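-- pv_equiv track=rewrite | github.com/material-lab-io/X | functions/diagrams/theme_selector.py | get_theme_category
-- ===== SOURCE A (Python) =====
-- def get_theme_category(theme_name: str) -> str:
--     """
--     Categorize themes by style
--
--     Args:
--         theme_name: Name of the theme
--
--     Returns:
--         Category of the theme
--     """
--     categories = {
--         "dark": ["black-knight", "carbon-gray", "cyborg", "hacker", "reddress-darkblue", "superhero"],
--         "light": ["lightgray", "plain", "sandstone", "silver", "spacelab", "united"],
--         "colorful": ["cerulean", "mars", "minty", "Sunlust", "toy", "vibrant"],
--         "retro": ["amiga", "crt-amber", "mimeograph"],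
--         "technical": ["blueprint", "aws-orange", "cloudscape-design"],
--         "artistic": ["sketchy", "materia"],
--         "monochrome": ["mono", "metal"],
--         "special": ["none", "bluegray", "reddress-lightblue"]
--     }
--
--     for category, themes in categories.items():
--         if theme_name in themes:
--             return category
--
--     return "standard"
-- ===== SOURCE B (Python) =====
-- # Flat literal reverse table: theme name -> category. Correct because the
-- # original category lists are pairwise disjoint, so the inverse is a function.
-- _THEME_CATEGORY = {
--     "black-knight": "dark", "carbon-gray": "dark", "cyborg": "dark",
--     "hacker": "dark", "reddress-darkblue": "dark", "superhero": "dark",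
--     "lightgray": "light", "plain": "light", "sandstone": "light",
--     "silver": "light", "spacelab": "light", "united": "light",
--     "cerulean": "colorful", "mars": "colorful", "minty": "colorful",
--     "Sunlust": "colorful", "toy": "colorful", "vibrant": "colorful",
--     "amiga": "retro", "crt-amber": "retro", "mimeograph": "retro",
--     "blueprint": "technical", "aws-orange": "technical",
--     "cloudscape-design": "technical",
--     "sketchy": "artistic", "materia": "artistic",
--     "mono": "monochrome", "metal": "monochrome",
--     "none": "special", "bluegray": "special",
--     "reddress-lightblue": "special",
-- }
--
--
-- def get_theme_category(theme_name: str) -> str: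
--     """Categorize themes by style via a flat literal lookup table."""
--     return _THEME_CATEGORY.get(theme_name, "standard")
-- ===== Notes on version B (the rewrite author's own statement) =====
-- stated objective: idiomatic
-- what changed: Replaces the per-call scan over nested category lists with a flat literal theme-to-category dict and a single .get with default; there is no loop or membership test at all.
import Mathlib
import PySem

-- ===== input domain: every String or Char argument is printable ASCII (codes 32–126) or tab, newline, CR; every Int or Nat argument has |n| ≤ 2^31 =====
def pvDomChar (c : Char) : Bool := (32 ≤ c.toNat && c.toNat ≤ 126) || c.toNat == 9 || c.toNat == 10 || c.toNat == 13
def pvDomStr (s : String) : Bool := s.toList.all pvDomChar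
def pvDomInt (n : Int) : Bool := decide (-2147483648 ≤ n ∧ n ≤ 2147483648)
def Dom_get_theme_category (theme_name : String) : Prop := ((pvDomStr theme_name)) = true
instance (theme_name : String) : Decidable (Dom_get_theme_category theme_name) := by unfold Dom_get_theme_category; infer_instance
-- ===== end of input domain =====

-- B replaces A's per-call scan over nested category lists with a flat literal lookup table (idiomatic dict .get with default).

-- ===== PORT A =====
def pvCategoriesA : List (String × List String) :=
  [("dark", ["black-knight", "carbon-gray", "cyborg", "hacker", "reddress-darkblue", "superhero"]),
   ("light", ["lightgray", "plain", "sandstone", "silver", "spacelab", "united"]),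
   ("colorful", ["cerulean", "mars", "minty", "Sunlust", "toy", "vibrant"]),
   ("retro", ["amiga", "crt-amber", "mimeograph"]),
   ("technical", ["blueprint", "aws-orange", "cloudscape-design"]),
   ("artistic", ["sketchy", "materia"]),
   ("monochrome", ["mono", "metal"]),
   ("special", ["none", "bluegray", "reddress-lightblue"])]

def pvCatLoopA (theme_name : String) : List (String × List String) → String
  | [] => "standard"
  | (category, themes) :: rest =>
      if themes.contains theme_name then category else pvCatLoopA theme_name rest

def get_theme_category (theme_name : String) : String :=
  pvCatLoopA theme_name pvCategoriesA

-- ===== PORT B =====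
-- Flat literal reverse table (module-level dict literal in Source B).
def pvThemeCategoryTable : PySem.Dict String String :=
  PySem.Dict.mk
    [("black-knight", "dark"), ("carbon-gray", "dark"), ("cyborg", "dark"),
     ("hacker", "dark"), ("reddress-darkblue", "dark"), ("superhero", "dark"),
     ("lightgray", "light"), ("plain", "light"), ("sandstone", "light"),
     ("silver", "light"), ("spacelab", "light"), ("united", "light"),
     ("cerulean", "colorful"), ("mars", "colorful"), ("minty", "colorful"),
     ("Sunlust", "colorful"), ("toy", "colorful"), ("vibrant", "colorful"),
     ("amiga", "retro"), ("crt-amber", "retro"), ("mimeograph", "retro"),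
     ("blueprint", "technical"), ("aws-orange", "technical"),
     ("cloudscape-design", "technical"),
     ("sketchy", "artistic"), ("materia", "artistic"),
     ("mono", "monochrome"), ("metal", "monochrome"),
     ("none", "special"), ("bluegray", "special"),
     ("reddress-lightblue", "special")]

def get_theme_category_alt (theme_name : String) : String :=
  pvThemeCategoryTable.getD theme_name "standard"

-- ===== PRECONDITION & SPEC =====
def Spec_get_theme_category (theme_name : String) (out : String) : Prop := out = get_theme_category_alt theme_name
instance (theme_name : String) (out : String) : Decidable (Spec_get_theme_category theme_name out) := by unfold Spec_get_theme_category; infer_instance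

-- ===== CLAIM (what is proved, stated in full; the proofs are below) =====
def Claim_equal_get_theme_category : Prop := ∀ (theme_name : String), Dom_get_theme_category theme_name → Spec_get_theme_category theme_name (get_theme_category theme_name)

-- ===== LEMMAS AND PROOFS =====
theorem pv_main (theme_name : String) :
    pvCatLoopA theme_name pvCategoriesA = pvThemeCategoryTable.getD theme_name "standard" := by
  by_cases h1 : theme_name = "black-knight"
  · subst h1; rfl
  by_cases h2 : theme_name = "carbon-gray"
  · subst h2; rfl
  by_cases h3 : theme_name = "cyborg"
  · subst h3; rfl
  by_cases h4 : theme_name = "hacker"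
  · subst h4; rfl
  by_cases h5 : theme_name = "reddress-darkblue"
  · subst h5; rfl
  by_cases h6 : theme_name = "superhero"
  · subst h6; rfl
  by_cases h7 : theme_name = "lightgray"
  · subst h7; rfl
  by_cases h8 : theme_name = "plain"
  · subst h8; rfl
  by_cases h9 : theme_name = "sandstone"
  · subst h9; rfl
  by_cases h10 : theme_name = "silver"
  · subst h10; rfl
  by_cases h11 : theme_name = "spacelab"
  · subst h11; rfl
  by_cases h12 : theme_name = "united"
  · subst h12; rfl
  by_cases h13 : theme_name = "cerulean"
  · subst h13; rfl
  by_cases h14 : theme_name = "mars"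
  · subst h14; rfl
  by_cases h15 : theme_name = "minty"
  · subst h15; rfl
  by_cases h16 : theme_name = "Sunlust"
  · subst h16; rfl
  by_cases h17 : theme_name = "toy"
  · subst h17; rfl
  by_cases h18 : theme_name = "vibrant"
  · subst h18; rfl
  by_cases h19 : theme_name = "amiga"
  · subst h19; rfl
  by_cases h20 : theme_name = "crt-amber"
  · subst h20; rfl
  by_cases h21 : theme_name = "mimeograph"
  · subst h21; rfl
  by_cases h22 : theme_name = "blueprint"
  · subst h22; rfl
  by_cases h23 : theme_name = "aws-orange"
  · subst h23; rfl
  by_cases h24 : theme_name = "cloudscape-design"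
  · subst h24; rfl
  by_cases h25 : theme_name = "sketchy"
  · subst h25; rfl
  by_cases h26 : theme_name = "materia"
  · subst h26; rfl
  by_cases h27 : theme_name = "mono"
  · subst h27; rfl
  by_cases h28 : theme_name = "metal"
  · subst h28; rfl
  by_cases h29 : theme_name = "none"
  · subst h29; rfl
  by_cases h30 : theme_name = "bluegray"
  · subst h30; rfl
  by_cases h31 : theme_name = "reddress-lightblue"
  · subst h31; rfl
  simp [pvCatLoopA, pvCategoriesA, pvThemeCategoryTable, PySem.Dict.getD, PySem.Dict.get?, h1, Ne.symm h1, h2, Ne.symm h2, h3, Ne.symm h3, h4, Ne.symm h4, h5, Ne.symm h5, h6, Ne.symm h6, h7, Ne.symm h7, h8, Ne.symm h8, h9, Ne.symm h9, h10, Ne.symm h10, h11, Ne.symm h11, h12, Ne.symm h12, h13, Ne.symm h13, h14, Ne.symm h14, h15, Ne.symm h15, h16, Ne.symm h16, h17, Ne.symm h17, h18, Ne.symm h18, h19, Ne.symm h19, h20, Ne.symm h20, h21, Ne.symm h21, h22, Ne.symm h22, h23, Ne.symm h23, h24, Ne.symm h24, h25, Ne.symm h25, h26, Ne.symm h26, h27,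 Ne.symm h27, h28, Ne.symm h28, h29, Ne.symm h29, h30, Ne.symm h30, h31, Ne.symm h31]

-- ===== VERDICT (by name: the statement is the Claim_ definition above) =====
theorem get_theme_category_spec : Claim_equal_get_theme_category := by
  intro theme_name _
  unfold Spec_get_theme_category get_theme_category get_theme_category_alt
  exact pv_main theme_name
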